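-- pv_equiv track=rewrite | github.com/whitebox-research/c2-proving-ground-martinez-cot | chainscope/cot_eval.py | count_yes_and_no_words
-- ===== SOURCE A (Python) =====
-- STRIP_SYMBOLS = '*_.,:;!"'
--
-- def count_yes_and_no_words(words):
--     yes_words = ["YES", "Yes"]
--     no_words = ["NO", "No"]
--     yes_count = 0
--     no_count = 0
--     for word in words:
--         word = word.strip(STRIP_SYMBOLS)
--         if word in yes_words:
--             yes_count += 1
--         elif word in no_words:
--             no_count += 1
--     return no_count, yes_count
-- ===== SOURCE B (Python) =====
-- STRIP_SYMBOLS = '*_.,:;!"'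
--
-- def count_yes_and_no_words(words):
--     stripped = [w.strip(STRIP_SYMBOLS) for w in words]
--     no_count = stripped.count("NO") + stripped.count("No")
--     yes_count = stripped.count("YES") + stripped.count("Yes")
--     return no_count, yes_count
-- ===== Notes on version B (the rewrite author's own statement) =====
-- stated objective: alternative
-- what changed: Replaces the single accumulator loop with if/elif branching by a staged computation: strip all words once, then obtain each total by separate list.count scans with no conditional logic.
import Mathlib
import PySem

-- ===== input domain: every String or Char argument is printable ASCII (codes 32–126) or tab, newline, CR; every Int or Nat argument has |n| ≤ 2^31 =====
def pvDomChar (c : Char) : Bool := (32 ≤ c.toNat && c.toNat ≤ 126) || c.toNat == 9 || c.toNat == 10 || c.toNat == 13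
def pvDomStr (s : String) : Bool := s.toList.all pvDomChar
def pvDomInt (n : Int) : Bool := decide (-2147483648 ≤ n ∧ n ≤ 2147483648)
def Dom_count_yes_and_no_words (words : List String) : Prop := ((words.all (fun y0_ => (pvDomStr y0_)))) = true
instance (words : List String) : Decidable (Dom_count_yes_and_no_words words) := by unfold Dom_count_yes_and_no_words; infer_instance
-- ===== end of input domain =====

-- B strips all words in one mapping pass and gets each of the four totals by a
-- separate list.count scan, replacing A's if/elif accumulator loop. Alternative
-- decomposition, same O(n) cost.
-- ===== PORT A =====
def pvStrip (w : String) : String := PySem.Str.stripChars w "*_.,:;!\""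

def count_yes_and_no_words (words : List String) : Int × Int :=
  let yes_words : List String := ["YES", "Yes"]
  let no_words : List String := ["NO", "No"]
  let p := words.foldl (fun (p : Int × Int) word =>
    let word := pvStrip word
    if yes_words.contains word then (p.1 + 1, p.2)
    else if no_words.contains word then (p.1, p.2 + 1)
    else p) (0, 0)
  (p.2, p.1)

-- ===== PORT B =====
def count_yes_and_no_words_alt (words : List String) : Int × Int :=
  let stripped := words.map pvStrip
  let no_count : Int := (PySem.List.count stripped "NO") + (PySem.List.count stripped "No")
  let yes_count : Int := (PySem.List.count stripped "YES") + (PySem.List.count stripped "Yes")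
  (no_count, yes_count)

-- ===== PRECONDITION & SPEC =====
def Spec_count_yes_and_no_words (words : List String) (out : Int × Int) : Prop := out = count_yes_and_no_words_alt words
instance (words : List String) (out : Int × Int) : Decidable (Spec_count_yes_and_no_words words out) := by unfold Spec_count_yes_and_no_words; infer_instance

-- ===== CLAIM (what is proved, stated in full; the proofs are below) =====
def Claim_equal_count_yes_and_no_words : Prop := ∀ (words : List String), Dom_count_yes_and_no_words words → Spec_count_yes_and_no_words words (count_yes_and_no_words words)

-- ===== LEMMAS AND PROOFS =====
theorem pv_loop (l : List String) (y n : Int) :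
    l.foldl (fun (p : Int × Int) word =>
      let word := pvStrip word
      if (["YES", "Yes"] : List String).contains word then (p.1 + 1, p.2)
      else if (["NO", "No"] : List String).contains word then (p.1, p.2 + 1)
      else p) (y, n)
    = (y + ((l.map pvStrip).count "YES" : Int) + ((l.map pvStrip).count "Yes" : Int),
       n + ((l.map pvStrip).count "NO" : Int) + ((l.map pvStrip).count "No" : Int)) := by
  induction l generalizing y n with
  | nil => simp
  | cons h t ih =>
    simp only [List.foldl_cons, List.map_cons]
    split_ifs with h1 h2
    · rw [ih]
      have hd : pvStrip h = "YES" ∨ pvStrip h = "Yes" := by simpa using h1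
      rcases hd with e | e <;> simp [e] <;> ring
    · rw [ih]
      have hd : pvStrip h = "NO" ∨ pvStrip h = "No" := by simpa using h2
      rcases hd with e | e
      · have hy : pvStrip h ≠ "YES" ∧ pvStrip h ≠ "Yes" := by simpa using h1
        simp [e]; ring
      · have hy : pvStrip h ≠ "YES" ∧ pvStrip h ≠ "Yes" := by simpa using h1
        simp [e]; ring
    · rw [ih]
      have hy : pvStrip h ≠ "YES" ∧ pvStrip h ≠ "Yes" := by simpa using h1
      have hn : pvStrip h ≠ "NO" ∧ pvStrip h ≠ "No" := by simpa using h2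
      simp [hy.1, hy.2, hn.1, hn.2]

-- ===== VERDICT (by name: the statement is the Claim_ definition above) =====
theorem count_yes_and_no_words_spec : Claim_equal_count_yes_and_no_words := by
  intro words _
  unfold Spec_count_yes_and_no_words count_yes_and_no_words count_yes_and_no_words_alt
  simp only [pv_loop, PySem.List.count_eq]
  ring_nf
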